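-- pv_equiv track=rewrite | github.com/ZhangZhuoSJTU/tiny-dec | tiny_dec/analysis/ssa/transform.py | _build_dominator_tree
-- ===== SOURCE A (Python) =====
-- def _build_dominator_tree(
--     immediate_dominators: dict[int, int | None],
--     order_index: dict[int, int],
-- ) -> dict[int, tuple[int, ...]]:
--     children: dict[int, list[int]] = {start: [] for start in immediate_dominators}
--     for start, dominator in immediate_dominators.items():
--         if dominator is None:
--             continue
--         children[dominator].append(start)
--     return {
--         start: tuple(sorted(blocks, key=order_index.__getitem__))
--         for start, blocks in children.items()
--     }
-- ===== SOURCE B (Python) =====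
-- def _build_dominator_tree(
--     immediate_dominators: dict[int, int | None],
--     order_index: dict[int, int],
-- ) -> dict[int, tuple[int, ...]]:
--     # No children dict at all: sort all (child, dominator) edges once by the
--     # child's order index, then for each node select its children by scanning
--     # the globally sorted edge list (stability keeps ties in insertion order).
--     edges = sorted(
--         ((s, d) for s, d in immediate_dominators.items() if d is not None),
--         key=lambda e: order_index[e[0]],
--     )
--     return {
--         node: tuple(s for s, d in edges if d == node)
--         for node in immediate_dominators
--     }
-- ===== Notes on version B (the rewrite author's own statement) =====
-- stated objective: alternative
-- what changed: B builds no children dict and does no per-bucket sorts: it sorts the (child, dominator) edges once, globally, by the child's order index and then forms each node's tuple by filtering that single sorted list, relying on sort stability for ties.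
import Mathlib
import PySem

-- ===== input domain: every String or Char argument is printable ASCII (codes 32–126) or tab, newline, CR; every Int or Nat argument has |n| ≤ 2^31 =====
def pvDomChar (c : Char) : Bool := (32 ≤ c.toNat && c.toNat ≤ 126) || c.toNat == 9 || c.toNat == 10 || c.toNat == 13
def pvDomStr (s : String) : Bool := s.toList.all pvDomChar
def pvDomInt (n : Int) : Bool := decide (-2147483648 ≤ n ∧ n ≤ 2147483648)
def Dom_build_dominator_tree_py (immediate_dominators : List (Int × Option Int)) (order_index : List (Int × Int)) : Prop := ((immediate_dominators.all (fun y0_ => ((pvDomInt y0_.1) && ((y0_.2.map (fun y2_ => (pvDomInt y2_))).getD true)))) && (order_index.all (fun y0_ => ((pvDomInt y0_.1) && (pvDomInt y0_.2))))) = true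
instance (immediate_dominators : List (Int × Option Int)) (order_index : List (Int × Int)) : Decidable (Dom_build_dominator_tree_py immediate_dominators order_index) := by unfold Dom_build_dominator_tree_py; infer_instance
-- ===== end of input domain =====

-- B builds no children dict and does no per-bucket sorts: one global stable sort of
-- the (child, dominator) edges by the child's order index, then each node's tuple is
-- a filter of that single sorted list (objective: alternative decomposition).

-- ===== PORT A =====
def build_dominator_tree_py (immediate_dominators : List (Int × Option Int)) (order_index : List (Int × Int)) : List (Int × List Int) :=
  let idd := PySem.Dict.ofList immediate_dominators
  let oid := PySem.Dict.ofList order_index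
  -- children = {start: [] for start in immediate_dominators}
  let children0 : PySem.Dict Int (List Int) :=
    idd.keys.foldl (fun d s => d.insert s []) PySem.Dict.empty
  -- for start, dominator in immediate_dominators.items(): if dominator is None: continue
  --   children[dominator].append(start)      (KeyError when dominator is no key: excluded by Pre_)
  let children := idd.items.foldl (fun d p =>
    match p.2 with
    | none => d
    | some dom => d.modify dom [] (fun l => l ++ [p.1])) children0
  -- {start: tuple(sorted(blocks, key=order_index.__getitem__)) for start, blocks in children.items()}
  -- (order_index KeyError excluded by Pre_; getD is exact on Pre_)
  children.items.map (fun p => (p.1, PySem.List.sorted p.2 (fun b => oid.getD b 0)))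

-- ===== PORT B =====
def build_dominator_tree_py_alt (immediate_dominators : List (Int × Option Int)) (order_index : List (Int × Int)) : List (Int × List Int) :=
  let idd := PySem.Dict.ofList immediate_dominators
  let oid := PySem.Dict.ofList order_index
  -- edges = sorted(((s, d) for s, d in items if d is not None), key=lambda e: order_index[e[0]])
  -- (order_index KeyError excluded by Pre_; getD is exact on Pre_)
  let edges := PySem.List.sorted (idd.items.filter (fun p => p.2.isSome)) (fun e => oid.getD e.1 0)
  -- {node: tuple(s for s, d in edges if d == node) for node in immediate_dominators}
  idd.keys.map (fun node => (node, (edges.filter (fun e => e.2 == some node)).map (fun e => e.1)))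

-- ===== PRECONDITION & SPEC =====
-- Pre_ excludes exactly the inputs on which A raises KeyError: an item whose dominator is
-- not itself a key of immediate_dominators, or a non-root node missing from order_index.
def Pre_build_dominator_tree_py (immediate_dominators : List (Int × Option Int)) (order_index : List (Int × Int)) : Prop :=
  ((PySem.Dict.ofList immediate_dominators).items.all (fun p =>
    p.2.all (fun dom =>
      decide (dom ∈ (PySem.Dict.ofList immediate_dominators).keys) &&
      decide (p.1 ∈ (PySem.Dict.ofList order_index).keys)))) = true
instance (immediate_dominators : List (Int × Option Int)) (order_index : List (Int × Int)) : Decidable (Pre_build_dominator_tree_py immediate_dominators order_index) := by unfold Pre_build_dominator_tree_py; infer_instance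

def pvWitness_build_dominator_tree_py : (List (Int × Option Int)) × (List (Int × Int)) :=
  ([(0, none), (1, some 0), (2, some 0)], [(1, 7), (2, 3)])

def Spec_build_dominator_tree_py (immediate_dominators : List (Int × Option Int)) (order_index : List (Int × Int)) (out : List (Int × List Int)) : Prop := out = build_dominator_tree_py_alt immediate_dominators order_index
instance (immediate_dominators : List (Int × Option Int)) (order_index : List (Int × Int)) (out : List (Int × List Int)) : Decidable (Spec_build_dominator_tree_py immediate_dominators order_index out) := by unfold Spec_build_dominator_tree_py; infer_instance

-- ===== CLAIM (what is proved, stated in full; the proofs are below) =====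
def Claim_equal_build_dominator_tree_py : Prop := ∀ (immediate_dominators : List (Int × Option Int)) (order_index : List (Int × Int)), Dom_build_dominator_tree_py immediate_dominators order_index → Pre_build_dominator_tree_py immediate_dominators order_index → Spec_build_dominator_tree_py immediate_dominators order_index (build_dominator_tree_py immediate_dominators order_index)

-- ===== LEMMAS AND PROOFS =====

-- getD of a "fill every key with []" loop is always [].
theorem pv_getD_foldl_insert_nil (l : List Int) (d : PySem.Dict Int (List Int)) (c : Int)
    (h : d.getD c [] = []) :
    (l.foldl (fun d s => d.insert s ([] : List Int)) d).getD c [] = [] := by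
  induction l generalizing d with
  | nil => exact h
  | cons s t ih =>
      simp only [List.foldl_cons]
      exact ih _ (by rw [PySem.Dict.getD_insert]; split <;> simp [h])

-- inserting an element every present element must precede puts it in front
theorem pv_insertBy_all_before {α : Type} (before : α → α → Bool) (x : α) (zs : List α)
    (h : ∀ z ∈ zs, before x z = true) :
    PySem.List.insertBy before x zs = x :: zs := by
  cases zs with
  | nil => rfl
  | cons z t => simp [PySem.List.insertBy, h z (by simp)]

-- stability: filtering commutes with stable insertion into a key-sorted list
theorem pv_filter_insertBy {α κ : Type} [LinearOrder κ] (key : α → κ) (p : α → Bool)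
    (x : α) (ys : List α) (hys : ys.Pairwise (fun a b => key a ≤ key b)) :
    (PySem.List.insertBy (fun a b => decide (key a < key b)) x ys).filter p =
      if p x then PySem.List.insertBy (fun a b => decide (key a < key b)) x (ys.filter p)
      else ys.filter p := by
  induction ys with
  | nil =>
      simp [PySem.List.insertBy]
      split <;> simp_all
  | cons y t ih =>
      rcases List.pairwise_cons.mp hys with ⟨hy, ht⟩
      by_cases hxy : key x < key y
      · have hb : (decide (key x < key y)) = true := by simpa using hxy
        simp only [PySem.List.insertBy, hb, if_true]
        by_cases hpx : p x = true
        · have hall : ∀ z ∈ (y :: t).filter p, (decide (key x < key z)) = true := by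
            intro z hz
            have hz' := List.mem_of_mem_filter hz
            rcases List.mem_cons.mp hz' with rfl | hz''
            · simpa using hxy
            · simpa using lt_of_lt_of_le hxy (hy z hz'')
          rw [pv_insertBy_all_before _ _ _ hall]
          simp [List.filter, hpx]
        · simp at hpx
          simp [List.filter, hpx]
      · have hb : (decide (key x < key y)) = false := by simpa using hxy
        simp only [PySem.List.insertBy, hb]
        have iht := ih ht
        by_cases hpx : p x = true <;> by_cases hpy : p y = true <;>
          simp_all [List.filter, PySem.List.insertBy]

theorem pv_filter_sorted {α κ : Type} [LinearOrder κ] (key : α → κ) (p : α → Bool)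
    (l : List α) :
    (PySem.List.sorted l key).filter p = PySem.List.sorted (l.filter p) key := by
  induction l using List.reverseRecOn with
  | nil => simp [PySem.List.sorted]
  | append_singleton t x ih =>
      rw [PySem.List.sorted_eq_foldl_insertBy, List.foldl_append]
      rw [← PySem.List.sorted_eq_foldl_insertBy]
      simp only [List.foldl_cons, List.foldl_nil]
      rw [pv_filter_insertBy key p x _ (PySem.List.sorted_pairwise t key)]
      rw [List.filter_append]
      by_cases hpx : p x = true
      · simp only [List.filter, hpx]
        rw [PySem.List.sorted_eq_foldl_insertBy (t.filter p ++ [x]), List.foldl_append]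
        rw [← PySem.List.sorted_eq_foldl_insertBy]
        simp [ih]
      · simp at hpx
        simp [List.filter, hpx, ih]

theorem pv_map_insertBy {α β κ : Type} [LinearOrder κ] (key : β → κ) (f : α → β)
    (x : α) (l : List α) :
    (PySem.List.insertBy (fun a b => decide (key (f a) < key (f b))) x l).map f =
      PySem.List.insertBy (fun a b => decide (key a < key b)) (f x) (l.map f) := by
  induction l with
  | nil => rfl
  | cons y t ih =>
      simp only [PySem.List.insertBy, List.map_cons]
      split <;> rename_i h
      · simp
      · simp only [List.map_cons, ih]

theorem pv_map_sorted {α β κ : Type} [LinearOrder κ] (key : β → κ) (f : α → β)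
    (l : List α) :
    (PySem.List.sorted l (fun a => key (f a))).map f = PySem.List.sorted (l.map f) key := by
  induction l using List.reverseRecOn with
  | nil => simp [PySem.List.sorted]
  | append_singleton t x ih =>
      rw [PySem.List.sorted_eq_foldl_insertBy, List.foldl_append,
        ← PySem.List.sorted_eq_foldl_insertBy]
      simp only [List.map_append, List.map_cons, List.map_nil]
      rw [PySem.List.sorted_eq_foldl_insertBy (t.map f ++ [f x]),
        List.foldl_append, ← PySem.List.sorted_eq_foldl_insertBy]
      simp only [List.foldl_cons, List.foldl_nil]
      rw [pv_map_insertBy key f x _, ih]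

-- updating a set with elements it already has changes nothing
theorem pv_set_update_self (s : PySem.Set Int) (xs : List Int)
    (h : ∀ x ∈ xs, x ∈ s) : PySem.Set.update s xs = s := by
  rw [PySem.Set.update_eq_append_filter]
  have : (PySem.Set.ofList xs).filter (fun y => !PySem.Set.contains s y) = [] := by
    rw [List.filter_eq_nil_iff]
    intro y hy
    have hyx : y ∈ xs := by rw [PySem.Set.mem_ofList] at hy; exact hy
    simp [h y hyx]
  rw [this, List.append_nil]

-- ===== VERDICT (by name: the statement is the Claim_ definition above) =====

theorem build_dominator_tree_py_spec : Claim_equal_build_dominator_tree_py := by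
  intro imm oi _hdom hpre
  unfold Spec_build_dominator_tree_py build_dominator_tree_py build_dominator_tree_py_alt
  simp only []
  set idd := PySem.Dict.ofList imm with hidd
  set oid := PySem.Dict.ofList oi with hoid
  set K := idd.keys with hK
  set children0 : PySem.Dict Int (List Int) :=
    K.foldl (fun d s => d.insert s []) PySem.Dict.empty with hch0
  set F := idd.items.filter (fun p => p.2.isSome) with hF
  set key : Int → Int := fun b => oid.getD b 0 with hkey
  -- Pre_: every dominator of an edge is a key
  have hpre' : ∀ p ∈ F, p.2.getD 0 ∈ K := by
    intro p hp
    have hmem := List.mem_of_mem_filter hp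
    have hsome : p.2.isSome := by
      have := List.of_mem_filter hp; simpa using this
    unfold Pre_build_dominator_tree_py at hpre
    rw [List.all_eq_true] at hpre
    have := hpre p hmem
    cases h2 : p.2 with
    | none => rw [h2] at hsome; simp at hsome
    | some dom =>
        rw [h2] at this
        simp only [Option.all_some, Bool.and_eq_true, decide_eq_true_eq] at this
        simpa [h2] using this.1
  -- rewrite A's loop into a modify-fold over pairs (dominator, start)
  have hstep : (fun (d : PySem.Dict Int (List Int)) (p : Int × Option Int) =>
      match p.2 with
      | none => d
      | some dom => d.modify dom [] (fun l => l ++ [p.1])) =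
      (fun d p => if p.2.isSome then d.modify (p.2.getD 0) [] (fun l => l ++ [p.1]) else d) := by
    funext d p
    rcases p with ⟨a, b⟩
    cases b <;> rfl
  have hfoldA : ∀ (l : List (Int × Option Int)) (d : PySem.Dict Int (List Int)),
      l.foldl (fun d p => match p.2 with
        | none => d
        | some dom => d.modify dom [] (fun l => l ++ [p.1])) d =
      (l.filter (fun p => p.2.isSome)).foldl
        (fun d p => d.modify (p.2.getD 0) [] (fun l => l ++ [p.1])) d := by
    intro l d
    rw [hstep, PySem.List.foldl_if_eq_foldl_filter]
  have hmodify_fold : ∀ (l : List (Int × Option Int)) (d : PySem.Dict Int (List Int)),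
      l.foldl (fun d p => d.modify (p.2.getD 0) [] (fun lst => lst ++ [p.1])) d =
      (l.map (fun p => (p.2.getD 0, p.1))).foldl
        (fun d q => d.modify q.1 [] (fun lst => lst ++ [q.2])) d := by
    intro l d
    rw [List.foldl_map]
  -- children0 facts
  have hKnodup : K.Nodup := PySem.Dict.nodup_keys_ofList imm
  have hch0keys : children0.keys = K := by
    rw [hch0, PySem.Dict.keys_foldl_insert, PySem.Dict.keys_empty,
      PySem.Set.update_nil_left, PySem.Set.ofList_eq_self_of_nodup _ hKnodup]
  have hch0getD : ∀ c : Int, children0.getD c [] = [] := by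
    intro c
    exact pv_getD_foldl_insert_nil K PySem.Dict.empty c (PySem.Dict.getD_empty _ _)
  -- A's children dict
  set chA := idd.items.foldl (fun d p => match p.2 with
    | none => d
    | some dom => d.modify dom [] (fun l => l ++ [p.1])) children0 with hchA
  have hgetA : ∀ c : Int, chA.getD c [] =
      (F.filter (fun p => p.2.getD 0 == c)).map (fun p => p.1) := by
    intro c
    rw [hchA, hfoldA, hmodify_fold, PySem.Dict.getD_foldl_modify_append, hch0getD,
      List.filter_map, List.map_map]
    rfl
  have hkeysA : chA.keys = K := by
    rw [hchA, hfoldA, hmodify_fold, PySem.Dict.keys_foldl_modify_key, hch0keys,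
      List.map_map]
    apply pv_set_update_self
    intro x hx
    rcases List.mem_map.mp hx with ⟨p, hp, hpx⟩
    have := hpre' p hp
    simpa [← hpx] using this
  have hitemsA : chA.items = K.map (fun c => (c, chA.getD c [])) := by
    have := PySem.Dict.items_eq_map_keys chA (by rw [hkeysA]; exact hKnodup) ([] : List Int)
    rw [hkeysA] at this
    exact this
  rw [hitemsA, List.map_map]
  apply List.map_congr_left
  intro c _
  simp only [Function.comp]
  refine Prod.ext rfl ?_
  show PySem.List.sorted (chA.getD c []) key =
    ((PySem.List.sorted F (fun e => key e.1)).filter (fun e => e.2 == some c)).map (fun e => e.1)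
  -- on edges (isSome holds) the two bucket predicates coincide
  have hpredF : ∀ l : List (Int × Option Int), (∀ p ∈ l, p.2.isSome = true) →
      l.filter (fun p => p.2.getD 0 == c) = l.filter (fun e => e.2 == some c) := by
    intro l hl
    apply List.filter_congr
    intro p hp
    have := hl p hp
    cases h2 : p.2 with
    | none => rw [h2] at this; simp at this
    | some dom => simp
  have hFsome : ∀ p ∈ F, p.2.isSome = true := by
    intro p hp
    have := List.of_mem_filter hp; simpa using this
  rw [hgetA, hpredF F hFsome,
    pv_filter_sorted (fun e => key e.1) (fun e => e.2 == some c) F,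
    pv_map_sorted key (fun e : Int × Option Int => e.1)]
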